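-- pv_equiv track=rewrite | github.com/LMP-dev/AdventOfCode | 2025/day_10/PuzzleB.py | _increase_counter
-- ===== SOURCE A (Python) =====
-- def _increase_counter(
--     counter: tuple[int, ...], btns_combination: tuple[tuple[int, ...]]
-- ) -> tuple[int, ...]:
--     temp_counter = list(counter)
--     for button in btns_combination:
--         for index in button:
--             temp_counter[index] += 1
--     return tuple(temp_counter)
-- ===== SOURCE B (Python) =====
-- def _increase_counter(
--     counter: tuple[int, ...], btns_combination: tuple[tuple[int, ...]]
-- ) -> tuple[int, ...]:
--     all_indices = [index for button in btns_combination for index in button]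
--     counts = {}
--     for index in all_indices:
--         counts[index] = counts.get(index, 0) + 1
--     temp_counter = list(counter)
--     for index, count in counts.items():
--         temp_counter[index] += count
--     return tuple(temp_counter)
-- ===== Notes on version B (the rewrite author's own statement) =====
-- stated objective: alternative
-- what changed: B first aggregates all button indices into a dict of occurrence counts and then applies one 'temp[index] += count' per DISTINCT index, instead of A's one increment per occurrence; equivalence rests on commutativity of the increments.
import Mathlib
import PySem

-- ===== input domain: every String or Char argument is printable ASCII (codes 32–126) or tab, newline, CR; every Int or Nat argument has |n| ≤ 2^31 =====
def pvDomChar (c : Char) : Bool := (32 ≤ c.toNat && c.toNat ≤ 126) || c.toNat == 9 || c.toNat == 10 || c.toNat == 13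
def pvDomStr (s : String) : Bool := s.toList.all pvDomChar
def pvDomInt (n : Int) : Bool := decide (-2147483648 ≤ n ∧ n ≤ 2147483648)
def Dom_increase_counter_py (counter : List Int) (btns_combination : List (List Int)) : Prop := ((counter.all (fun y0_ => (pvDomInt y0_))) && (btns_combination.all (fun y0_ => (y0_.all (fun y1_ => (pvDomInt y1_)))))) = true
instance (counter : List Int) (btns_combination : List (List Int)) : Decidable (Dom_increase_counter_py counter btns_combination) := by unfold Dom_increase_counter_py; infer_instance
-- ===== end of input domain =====

-- B aggregates indices into a dict of counts and applies one bulk increment per distinct index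
-- (alternative decomposition; A increments once per occurrence). Equivalent on all inputs where A returns.


-- ===== PORT A =====
def increase_counter_py (counter : List Int) (btns_combination : List (List Int)) : List Int :=
  let temp_counter := counter
  let temp_counter := btns_combination.foldl (fun temp_counter button =>
    button.foldl (fun temp_counter index =>
      PySem.List.pySetD temp_counter index (PySem.List.pyGetD temp_counter index 0 + 1))
      temp_counter) temp_counter
  temp_counter

-- ===== PORT B =====
def increase_counter_py_alt (counter : List Int) (btns_combination : List (List Int)) : List Int :=
  let all_indices := btns_combination.flatMap (fun button => button)
  let counts : PySem.Dict Int Int :=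
    all_indices.foldl (fun counts index =>
      counts.insert index (counts.getD index 0 + 1)) PySem.Dict.empty
  let temp_counter := counter
  let temp_counter := counts.items.foldl (fun temp_counter kc =>
    PySem.List.pySetD temp_counter kc.1 (PySem.List.pyGetD temp_counter kc.1 0 + kc.2)) temp_counter
  temp_counter

-- ===== PRECONDITION & SPEC =====
-- Pre_ excludes exactly the inputs on which Python A raises IndexError: some button index out of range.
def Pre_increase_counter_py (counter : List Int) (btns_combination : List (List Int)) : Prop :=
  ∀ button ∈ btns_combination, ∀ index ∈ button, PySem.Raise.InRange counter.length index
instance (counter : List Int) (btns_combination : List (List Int)) : Decidable (Pre_increase_counter_py counter btns_combination) := by unfold Pre_increase_counter_py; infer_instance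
def pvWitness_increase_counter_py : List Int × List (List Int) := ([3, 1, 4], [[0, 2], [2, -1], []])

def Spec_increase_counter_py (counter : List Int) (btns_combination : List (List Int)) (out : List Int) : Prop := out = increase_counter_py_alt counter btns_combination
instance (counter : List Int) (btns_combination : List (List Int)) (out : List Int) : Decidable (Spec_increase_counter_py counter btns_combination out) := by unfold Spec_increase_counter_py; infer_instance

-- ===== CLAIM (what is proved, stated in full; the proofs are below) =====
def Claim_equal_increase_counter_py : Prop := ∀ (counter : List Int) (btns_combination : List (List Int)), Dom_increase_counter_py counter btns_combination → Pre_increase_counter_py counter btns_combination → Spec_increase_counter_py counter btns_combination (increase_counter_py counter btns_combination)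

-- ===== LEMMAS AND PROOFS =====

-- the single-occurrence increment A performs
def pvBump (t : List Int) (i : Int) : List Int :=
  PySem.List.pySetD t i (PySem.List.pyGetD t i 0 + 1)

lemma pvIdx_lt {n : Nat} {i : Int} {j : Nat} (h : PySem.List.pyIdx? n i = some j) : j < n := by
  unfold PySem.List.pyIdx? at h
  split_ifs at h <;> simp_all <;> omega

-- bulk increment, normalized to a Nat-index update
lemma pvSetAdd_eq (t : List Int) (i c : Int) :
    PySem.List.pySetD t i (PySem.List.pyGetD t i 0 + c) =
      (match PySem.List.pyIdx? t.length i with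
       | none => t
       | some j => t.set j (t.getD j 0 + c)) := by
  cases h : PySem.List.pyIdx? t.length i <;>
    simp [PySem.List.pySetD, PySem.List.pySet?, PySem.List.pyGetD, PySem.List.pyGet?, h,
      List.getD_eq_getElem?_getD]

lemma pvBump_eq (t : List Int) (i : Int) :
    pvBump t i = (match PySem.List.pyIdx? t.length i with
       | none => t
       | some j => t.set j (t.getD j 0 + 1)) := pvSetAdd_eq t i 1

lemma pvBump_length (t : List Int) (i : Int) : (pvBump t i).length = t.length := by
  rw [pvBump_eq]
  cases h : PySem.List.pyIdx? t.length i <;> simp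

lemma pvBump_comm (t : List Int) (a b : Int) :
    pvBump (pvBump t a) b = pvBump (pvBump t b) a := by
  rw [pvBump_eq (pvBump t a) b, pvBump_eq (pvBump t b) a, pvBump_length, pvBump_length,
    pvBump_eq t a, pvBump_eq t b]
  cases ha : PySem.List.pyIdx? t.length a <;> cases hb : PySem.List.pyIdx? t.length b <;> simp
  rename_i ja jb
  have hja := pvIdx_lt ha
  have hjb := pvIdx_lt hb
  by_cases hj : ja = jb
  · subst hj
    simp [List.set_set]
  · rw [List.getElem?_set_ne (by omega), List.getElem?_set_ne (by omega),
        List.set_comm]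
    exact hj

-- one bulk add of m equals m single increments
lemma pvSetAdd_iter (m : Nat) (t : List Int) (k : Int) :
    PySem.List.pySetD t k (PySem.List.pyGetD t k 0 + (m : Int)) =
      (List.replicate m k).foldl pvBump t := by
  induction m generalizing t with
  | zero =>
    rw [pvSetAdd_eq]
    cases h : PySem.List.pyIdx? t.length k with
    | none => simp
    | some j =>
      have hj := pvIdx_lt h
      simp only [List.replicate_zero, List.foldl_nil, Nat.cast_zero, add_zero]
      rw [List.getD_eq_getElem _ _ (by simpa using hj)]
      exact List.set_getElem_self (by simpa using hj)
  | succ m ih =>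
    rw [List.replicate_succ, List.foldl_cons, ← ih (pvBump t k)]
    rw [pvSetAdd_eq, pvSetAdd_eq (pvBump t k), pvBump_length, pvBump_eq]
    cases h : PySem.List.pyIdx? t.length k with
    | none => simp
    | some j =>
      have hj := pvIdx_lt h
      simp only []
      rw [List.getD_eq_getElem _ _ (by simpa using hj),
          List.getD_eq_getElem _ _ (by simpa [List.length_set] using hj),
          List.getElem_set_self, List.set_set]
      congr 1
      push_cast
      ring

-- counting in the expanded replicate list over nodup keys
lemma pvCount_flatMap_replicate (cnt : Int → Nat) (ks : List Int) (hnd : ks.Nodup) (a : Int) :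
    (ks.flatMap (fun k => List.replicate (cnt k) k)).count a = if a ∈ ks then cnt a else 0 := by
  induction ks with
  | nil => simp
  | cons k ks ih =>
    have hk : k ∉ ks := (List.nodup_cons.mp hnd).1
    have hnd' : ks.Nodup := (List.nodup_cons.mp hnd).2
    rw [List.flatMap_cons, List.count_append, List.count_replicate, ih hnd']
    by_cases hak : a = k
    · subst hak
      simp [hk]
    · simp [Ne.symm hak, hak]

lemma pvA_eq (counter : List Int) (btns : List (List Int)) :
    increase_counter_py counter btns = (btns.flatMap id).foldl pvBump counter := by
  rw [List.foldl_flatMap]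
  rfl

lemma pvB_eq (counter : List Int) (btns : List (List Int)) :
    increase_counter_py_alt counter btns =
      ((PySem.Dict.counter (btns.flatMap id)).items).foldl
        (fun t kc => PySem.List.pySetD t kc.1 (PySem.List.pyGetD t kc.1 0 + kc.2)) counter := by
  rw [PySem.Dict.counter_eq_foldl]
  rfl

-- ===== VERDICT (by name: the statement is the Claim_ definition above) =====
theorem increase_counter_py_spec : Claim_equal_increase_counter_py := by
  intro counter btns _ _
  unfold Spec_increase_counter_py
  rw [pvA_eq, pvB_eq, PySem.Dict.items_counter]
  set flat := btns.flatMap id with hflat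
  rw [List.foldl_map]
  have hpt : (fun (t : List Int) (k : Int) =>
      PySem.List.pySetD t k (PySem.List.pyGetD t k 0 + (flat.count k : Int))) =
        (fun t k => (List.replicate (flat.count k) k).foldl pvBump t) :=
    funext fun t => funext fun k => pvSetAdd_iter _ t k
  rw [hpt, ← List.foldl_flatMap]
  apply List.Perm.foldl_eq' _ (fun x _ y _ z => pvBump_comm z x y)
  rw [List.perm_iff_count]
  intro a
  rw [pvCount_flatMap_replicate (fun k => flat.count k) _ (PySem.Set.nodup_ofList flat) a]
  by_cases ha : a ∈ flat
  · simp [PySem.Set.mem_ofList, ha]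
  · simp [PySem.Set.mem_ofList, ha, List.count_eq_zero.mpr ha]
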